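-- pv_equiv track=rewrite | github.com/flowersjus/white_star_kani_project | character_creation/name_generator.py | is_pronounceable
-- ===== SOURCE A (Python) =====
-- def is_pronounceable(name):
--     """
--     Check if a name is pronounceable by ensuring it has vowels and follows
--     basic phonetic patterns.
--
--     Args:
--         name: The name to check
--
--     Returns:
--         True if the name is pronounceable, False otherwise
--     """
--     if not name:
--         return False
--
--     # Check if the name has at least one vowel
--     if not any(c in 'aeiouy' for c in name.lower()):
--         return False
--
--     # Check for too many consecutive consonants (more than 3)
--     consonant_count = 0
--     for c in name.lower():
--         if c not in 'aeiouy':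
--             consonant_count += 1
--             if consonant_count > 3:
--                 return False
--         else:
--             consonant_count = 0
--
--     # Check for too many consecutive vowels (more than 3)
--     vowel_count = 0
--     for c in name.lower():
--         if c in 'aeiouy':
--             vowel_count += 1
--             if vowel_count > 3:
--                 return False
--         else:
--             vowel_count = 0
--
--     return True
-- ===== SOURCE B (Python) =====
-- from itertools import groupby
--
--
-- def is_pronounceable(name):
--     if not name:
--         return False
--     saw_vowel = False
--     for is_vowel, group in groupby(name.lower(), key=lambda c: c in 'aeiouy'):
--         if sum(1 for _ in group) > 3:
--             return False
--         if is_vowel: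
--             saw_vowel = True
--     return saw_vowel
-- ===== Notes on version B (the rewrite author's own statement) =====
-- stated objective: simpler
-- what changed: Replaces A's separate any-vowel check plus two independent counter loops (one for consonant runs, one for vowel runs) with a single itertools.groupby pass over maximal same-type runs, rejecting any run longer than 3 and remembering whether a vowel run was seen.
import Mathlib
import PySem

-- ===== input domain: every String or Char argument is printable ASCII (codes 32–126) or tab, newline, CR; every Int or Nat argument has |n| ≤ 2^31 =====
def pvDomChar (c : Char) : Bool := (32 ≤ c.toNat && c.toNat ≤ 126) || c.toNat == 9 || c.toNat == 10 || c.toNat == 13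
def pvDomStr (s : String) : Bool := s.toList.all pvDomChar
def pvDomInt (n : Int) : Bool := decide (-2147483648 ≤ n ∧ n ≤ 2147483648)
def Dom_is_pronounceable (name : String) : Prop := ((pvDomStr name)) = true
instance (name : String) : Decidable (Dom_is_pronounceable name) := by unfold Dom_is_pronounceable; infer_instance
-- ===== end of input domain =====

-- B replaces A's any-vowel check plus two separate run-counter loops by one groupby
-- pass over maximal same-type runs (objective: simpler, same O(n) cost).

-- ===== PORT A =====
-- c in 'aeiouy'  (exact for every Char)
def pvIsVowel (c : Char) : Bool := ['a','e','i','o','u','y'].contains c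

-- the consecutive-consonant loop of A (early `return False` ⇒ result false)
def pvConsLoop : List Char → Nat → Bool
  | [], _ => true
  | c :: cs, k =>
    if pvIsVowel c = false then
      (if k + 1 > 3 then false else pvConsLoop cs (k + 1))
    else pvConsLoop cs 0

-- the consecutive-vowel loop of A
def pvVowLoop : List Char → Nat → Bool
  | [], _ => true
  | c :: cs, k =>
    if pvIsVowel c then
      (if k + 1 > 3 then false else pvVowLoop cs (k + 1))
    else pvVowLoop cs 0

def is_pronounceable (name : String) : Bool :=
  if name = "" then false
  else
    let l := (PySem.Str.lower name).toList
    if (l.any pvIsVowel) = false then false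
    else if pvConsLoop l 0 = false then false
    else if pvVowLoop l 0 = false then false
    else true

-- ===== PORT B =====
-- itertools.groupby(lowered, key = c in 'aeiouy') as (key, run-length) pairs, front to back
def pvGroups : List Char → List (Bool × Nat)
  | [] => []
  | c :: cs =>
    (pvIsVowel c, (cs.takeWhile (fun x => pvIsVowel x = pvIsVowel c)).length + 1)
      :: pvGroups (cs.dropWhile (fun x => pvIsVowel x = pvIsVowel c))
termination_by l => l.length
decreasing_by
  simp only [List.length_cons]
  exact Nat.lt_succ_of_le (List.length_dropWhile_le _ _)

-- B's for-loop over the groups, carrying saw_vowel (early `return False` ⇒ result false)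
def pvCheckGroups : List (Bool × Nat) → Bool → Bool
  | [], saw => saw
  | (b, n) :: rest, saw =>
    if n > 3 then false else pvCheckGroups rest (saw || b)

def is_pronounceable_alt (name : String) : Bool :=
  if name = "" then false
  else pvCheckGroups (pvGroups ((PySem.Str.lower name).toList)) false

-- ===== PRECONDITION & SPEC =====
def Spec_is_pronounceable (name : String) (out : Bool) : Prop := out = is_pronounceable_alt name
instance (name : String) (out : Bool) : Decidable (Spec_is_pronounceable name out) := by unfold Spec_is_pronounceable; infer_instance

-- ===== CLAIM (what is proved, stated in full; the proofs are below) =====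
def Claim_equal_is_pronounceable : Prop := ∀ (name : String), Dom_is_pronounceable name → Spec_is_pronounceable name (is_pronounceable name)

-- ===== LEMMAS AND PROOFS =====

-- pvConsLoop over an all-consonant prefix: counts up with cutoff at > 3
lemma consLoop_cons_prefix (t : List Char) (r : List Char) (k : Nat)
    (hk : k ≤ 3) (ht : ∀ x ∈ t, pvIsVowel x = false) :
    pvConsLoop (t ++ r) k =
      if 3 < k + t.length then false else pvConsLoop r (k + t.length) := by
  induction t generalizing k with
  | nil => simp [Nat.not_lt.2 hk]
  | cons x t ih =>
    have hx : pvIsVowel x = false := ht x (by simp)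
    simp only [List.cons_append, pvConsLoop, hx]
    simp only [if_true]
    by_cases h : k + 1 > 3
    · rw [if_pos h, if_pos (by simp only [List.length_cons]; omega)]
    · rw [if_neg h, ih (k + 1) (by omega) (fun y hy => ht y (by simp [hy]))]
      simp only [List.length_cons]
      split_ifs <;> first | rfl | omega | (congr 1; omega)

-- a vowel (or the end) resets the consonant counter
lemma consLoop_reset (r : List Char) (k : Nat)
    (hr : r = [] ∨ ∃ v rs, r = v :: rs ∧ pvIsVowel v = true) :
    pvConsLoop r k = pvConsLoop r 0 := by
  rcases hr with h | ⟨v, rs, rfl, hv⟩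
  · subst h; rfl
  · simp [pvConsLoop, hv]

-- pvConsLoop ignores a nonempty all-vowel run (each vowel resets to 0)
lemma consLoop_vowrun (t : List Char) (x : Char) (r : List Char) (k : Nat)
    (hx : pvIsVowel x = true) (ht : ∀ z ∈ t, pvIsVowel z = true) :
    pvConsLoop (x :: (t ++ r)) k = pvConsLoop r 0 := by
  induction t generalizing x k with
  | nil => simp [pvConsLoop, hx]
  | cons y t ih =>
    simp only [pvConsLoop, hx, List.cons_append]
    simp only [Bool.true_eq_false, if_false]
    exact ih y 0 (ht y (by simp)) (fun z hz => ht z (by simp [hz]))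

-- pvVowLoop over an all-vowel prefix
lemma vowLoop_vow_prefix (t : List Char) (r : List Char) (k : Nat)
    (hk : k ≤ 3) (ht : ∀ x ∈ t, pvIsVowel x = true) :
    pvVowLoop (t ++ r) k =
      if 3 < k + t.length then false else pvVowLoop r (k + t.length) := by
  induction t generalizing k with
  | nil => simp [Nat.not_lt.2 hk]
  | cons x t ih =>
    have hx : pvIsVowel x = true := ht x (by simp)
    simp only [List.cons_append, pvVowLoop, hx]
    simp only [if_true]
    by_cases h : k + 1 > 3
    · rw [if_pos h, if_pos (by simp only [List.length_cons]; omega)]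
    · rw [if_neg h, ih (k + 1) (by omega) (fun y hy => ht y (by simp [hy]))]
      simp only [List.length_cons]
      split_ifs <;> first | rfl | omega | (congr 1; omega)

lemma vowLoop_reset (r : List Char) (k : Nat)
    (hr : r = [] ∨ ∃ v rs, r = v :: rs ∧ pvIsVowel v = false) :
    pvVowLoop r k = pvVowLoop r 0 := by
  rcases hr with h | ⟨v, rs, rfl, hv⟩
  · subst h; rfl
  · simp [pvVowLoop, hv]

-- pvVowLoop ignores a nonempty all-consonant run
lemma vowLoop_consrun (t : List Char) (x : Char) (r : List Char) (k : Nat)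
    (hx : pvIsVowel x = false) (ht : ∀ z ∈ t, pvIsVowel z = false) :
    pvVowLoop (x :: (t ++ r)) k = pvVowLoop r 0 := by
  induction t generalizing x k with
  | nil => simp [pvVowLoop, hx]
  | cons y t ih =>
    simp only [pvVowLoop, hx, List.cons_append]
    simp only [Bool.false_eq_true, if_false]
    exact ih y 0 (ht y (by simp)) (fun z hz => ht z (by simp [hz]))

-- head of the rest after a run (if any) has the opposite type
lemma dropWhile_head_shape (cs : List Char) (b : Bool) :
    cs.dropWhile (fun x => pvIsVowel x = b) = [] ∨
      ∃ v rs, cs.dropWhile (fun x => pvIsVowel x = b) = v :: rs ∧ pvIsVowel v = !b := by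
  rcases h : cs.dropWhile (fun x => pvIsVowel x = b) with _ | ⟨v, rs⟩
  · exact Or.inl rfl
  · refine Or.inr ⟨v, rs, rfl, ?_⟩
    have := List.head_dropWhile_not (p := fun x => pvIsVowel x = b) (l := cs) (by simp [h])
    simp only [h, List.head_cons] at this
    cases hb : pvIsVowel v <;> cases b <;> simp_all

-- main invariant: B's group scan equals A's three checks
lemma checkGroups_eq (l : List Char) :
    ∀ saw, pvCheckGroups (pvGroups l) saw =
      ((pvConsLoop l 0 && pvVowLoop l 0) && (saw || l.any pvIsVowel)) := by
  induction l using pvGroups.induct with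
  | case1 => intro saw; simp [pvGroups, pvCheckGroups, pvConsLoop, pvVowLoop]
  | case2 c cs ih =>
    intro saw
    rw [pvGroups]
    simp only [pvCheckGroups]
    have ht0 : ∀ x ∈ cs.takeWhile (fun x => pvIsVowel x = pvIsVowel c), pvIsVowel x = pvIsVowel c :=
      fun x hx => by simpa using List.mem_takeWhile_imp hx
    have hr0 := dropWhile_head_shape cs (pvIsVowel c)
    have hsplit := List.takeWhile_append_dropWhile
      (p := fun x => decide (pvIsVowel x = pvIsVowel c)) (l := cs)
    generalize hT : cs.takeWhile (fun x => pvIsVowel x = pvIsVowel c) = t at *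
    generalize hR : cs.dropWhile (fun x => pvIsVowel x = pvIsVowel c) = r at *
    subst hsplit
    cases hv : pvIsVowel c with
    | false =>
      have htf : ∀ z ∈ t, pvIsVowel z = false := fun z hz => by rw [ht0 z hz, hv]
      have hrv : r = [] ∨ ∃ v rs, r = v :: rs ∧ pvIsVowel v = true := by
        rcases hr0 with h | ⟨v, rs, h1, h2⟩
        · exact Or.inl h
        · exact Or.inr ⟨v, rs, h1, by rw [h2, hv]; rfl⟩
      have hcons : pvConsLoop (c :: (t ++ r)) 0 =
          if 3 < t.length + 1 then false else pvConsLoop r 0 := by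
        rw [show c :: (t ++ r) = (c :: t) ++ r from rfl,
          consLoop_cons_prefix (c :: t) r 0 (by omega)
            (fun z hz => by rcases List.mem_cons.1 hz with rfl | hz; exact hv; exact htf z hz)]
        simp only [List.length_cons, Nat.zero_add]
        split_ifs
        · rfl
        · exact consLoop_reset r _ hrv
      have hvow : pvVowLoop (c :: (t ++ r)) 0 = pvVowLoop r 0 :=
        vowLoop_consrun t c r 0 hv htf
      have hany : (c :: (t ++ r)).any pvIsVowel = r.any pvIsVowel := by
        simp only [List.any_cons, List.any_append, hv, Bool.false_or]
        rw [show t.any pvIsVowel = false from List.any_eq_false.2 (by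
          intro z hz; simp [htf z hz])]
        simp
      rw [hcons, hvow, hany]
      by_cases hlen : t.length + 1 > 3
      · rw [if_pos hlen, if_pos hlen]; simp
      · rw [if_neg hlen, Bool.or_false, if_neg hlen, ih saw]
    | true =>
      have htt : ∀ z ∈ t, pvIsVowel z = true := fun z hz => by rw [ht0 z hz, hv]
      have hrc : r = [] ∨ ∃ v rs, r = v :: rs ∧ pvIsVowel v = false := by
        rcases hr0 with h | ⟨v, rs, h1, h2⟩
        · exact Or.inl h
        · exact Or.inr ⟨v, rs, h1, by rw [h2, hv]; rfl⟩
      have hvow : pvVowLoop (c :: (t ++ r)) 0 =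
          if 3 < t.length + 1 then false else pvVowLoop r 0 := by
        rw [show c :: (t ++ r) = (c :: t) ++ r from rfl,
          vowLoop_vow_prefix (c :: t) r 0 (by omega)
            (fun z hz => by rcases List.mem_cons.1 hz with rfl | hz; exact hv; exact htt z hz)]
        simp only [List.length_cons, Nat.zero_add]
        split_ifs
        · rfl
        · exact vowLoop_reset r _ hrc
      have hcons : pvConsLoop (c :: (t ++ r)) 0 = pvConsLoop r 0 :=
        consLoop_vowrun t c r 0 hv htt
      have hany : (c :: (t ++ r)).any pvIsVowel = true := by
        simp [List.any_cons, hv]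
      rw [hcons, hvow, hany]
      by_cases hlen : t.length + 1 > 3
      · rw [if_pos hlen, if_pos hlen]; simp
      · rw [if_neg hlen, Bool.or_true, if_neg hlen, ih true]
        simp

-- ===== VERDICT (by name: the statement is the Claim_ definition above) =====
theorem is_pronounceable_spec : Claim_equal_is_pronounceable := by
  intro name _
  unfold Spec_is_pronounceable is_pronounceable is_pronounceable_alt
  by_cases hn : name = ""
  · simp [hn]
  · rw [if_neg hn, if_neg hn]
    set l := (PySem.Str.lower name).toList
    rw [checkGroups_eq l false]
    cases h1 : l.any pvIsVowel <;> cases h2 : pvConsLoop l 0 <;> cases h3 : pvVowLoop l 0 <;>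
      simp [h1, h2, h3]
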